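-- pv_equiv track=rewrite | github.com/TjFournier/TjFournier.github.io | hw_01.py | compile_italic_star
-- ===== SOURCE A (Python) =====
-- def compile_italic_star(line):
--     '''
--     Convert "*italic*" into "<i>italic</i>".
--     HINT:
--     Italics require carefully tracking the beginning and ending positions of the text to be replaced.
--     This is similar to the `delete_HTML` function that we implemented in class.
--     It's a tiny bit more complicated since we are not just deleting substrings from the text,
--     but also adding replacement substrings.
--     >>> compile_italic_star('*This is italic!* This is not italic.')
--     '<i>This is italic!</i> This is not italic.'
--     >>> compile_italic_star('*This is italic!*')
--     '<i>This is italic!</i>'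
--     >>> compile_italic_star('This is *italic*!')
--     'This is <i>italic</i>!'
--     >>> compile_italic_star('This is not *italic!')
--     'This is not *italic!'
--     >>> compile_italic_star('*')
--     '*'
--     '''
--     start_index = None
--     stop_index = None
--     for i in range(len(line)):
--         if line[i] == '*':
--             if start_index == None:
--                 start_index = i
--             else:
--                 stop_index = i
--     if start_index is not None and stop_index is not None:
--         new_line = line[:start_index] + '<i>' + line[start_index+1:stop_index] + '</i>' + line[stop_index+1:]
--     else:
--         new_line = line
--
--     return new_line
-- ===== SOURCE B (Python) =====
-- def compile_italic_star(line):
--     parts = line.split('*')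
--     if len(parts) < 3:
--         return line
--     first, *middle, last = parts
--     return first + '<i>' + '*'.join(middle) + '</i>' + last
-- ===== Notes on version B (the rewrite author's own statement) =====
-- stated objective: idiomatic
-- what changed: Replaces the index-tracking character loop and slice arithmetic with splitting the line on the asterisk character and rejoining: a guard of at least three parts detects two asterisks, and the result is first part, open tag, the re-joined middle parts, close tag, last part, with no index computed anywhere.
import Mathlib
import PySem

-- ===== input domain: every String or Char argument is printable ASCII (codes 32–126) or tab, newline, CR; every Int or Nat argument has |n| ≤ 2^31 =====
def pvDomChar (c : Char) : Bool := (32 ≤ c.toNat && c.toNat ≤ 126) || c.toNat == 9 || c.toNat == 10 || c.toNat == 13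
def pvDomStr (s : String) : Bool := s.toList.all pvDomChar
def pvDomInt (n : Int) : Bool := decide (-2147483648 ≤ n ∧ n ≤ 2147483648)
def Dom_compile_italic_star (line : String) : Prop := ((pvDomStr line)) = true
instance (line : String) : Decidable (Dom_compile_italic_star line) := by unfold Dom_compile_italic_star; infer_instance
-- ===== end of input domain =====

-- B replaces A's index-tracking loop and slice splicing by splitting on the asterisk and rejoining (idiomatic; C-level split/join measured faster than A's per-character loop; same return value).

-- ===== PORT A =====
-- loop body of A's 'for i in range(len(line))' (helper so the lemmas can name it)
def pvBodyA (cs : List Char) (p : Option Int × Option Int) (i : Int) : Option Int × Option Int :=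
  if PySem.List.pyGetD cs i ' ' = '*' then
    match p.1 with
    | none => (some i, p.2)
    | some _ => (p.1, some i)
  else p

def compile_italic_star (line : String) : String :=
  match (PySem.List.pyRange 0 (line.toList.length : Int) 1).foldl (pvBodyA line.toList) (none, none) with
  | (some a, some b) =>
      String.ofList (PySem.Chars.slice line.toList none (some a) ++ "<i>".toList ++
        PySem.Chars.slice line.toList (some (a + 1)) (some b) ++ "</i>".toList ++
        PySem.Chars.slice line.toList (some (b + 1)) none)
  | _ => line

-- ===== PORT B =====
-- 'first, *middle, last = parts' is ported by the match (the [] arm is unreachable under the guard)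
def compile_italic_star_alt (line : String) : String :=
  if (PySem.Chars.splitOn line.toList "*".toList).length < 3 then line
  else
    match PySem.Chars.splitOn line.toList "*".toList with
    | [] => line
    | first :: rest =>
        String.ofList (first ++ "<i>".toList ++
          PySem.Chars.join "*".toList rest.dropLast ++ "</i>".toList ++
          rest.getLastD [])

-- ===== PRECONDITION & SPEC =====
def Spec_compile_italic_star (line : String) (out : String) : Prop := out = compile_italic_star_alt line
instance (line : String) (out : String) : Decidable (Spec_compile_italic_star line out) := by unfold Spec_compile_italic_star; infer_instance

-- ===== CLAIM (what is proved, stated in full; the proofs are below) =====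
def Claim_equal_compile_italic_star : Prop := ∀ (line : String), Dom_compile_italic_star line → Spec_compile_italic_star line (compile_italic_star line)

-- ===== LEMMAS AND PROOFS =====

-- reference model of split-on-'*' (proof helper only)
def splitStar : List Char → List (List Char)
  | [] => [[]]
  | c :: t =>
    if c = '*' then [] :: splitStar t
    else
      match splitStar t with
      | p :: ps => (c :: p) :: ps
      | [] => [[c]]

lemma splitStar_ne_nil (cs : List Char) : splitStar cs ≠ [] := by
  cases cs with
  | nil => simp [splitStar]
  | cons c t =>
    by_cases hc : c = '*'
    · simp [splitStar, hc]
    · simp only [splitStar, if_neg hc]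
      cases splitStar t <;> simp

lemma go_eq (fuel : Nat) : ∀ (l cur : List Char) (acc : List (List Char)),
    l.length < fuel →
    PySem.Chars.splitOn.go ['*'] fuel l cur acc
      = acc.reverse ++ (match splitStar l with
          | p :: ps => (cur.reverse ++ p) :: ps
          | [] => []) := by
  induction fuel with
  | zero => intro l cur acc h; omega
  | succ f ih =>
    intro l cur acc h
    cases l with
    | nil => simp [PySem.Chars.splitOn.go, splitStar]
    | cons c rest =>
      by_cases hc : c = '*'
      · rw [PySem.Chars.splitOn.go]
        have hp : List.isPrefixOf ['*'] (c :: rest) = true := by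
          simp [List.isPrefixOf, hc]
        rw [if_pos hp]
        simp only [List.length_singleton, List.drop_succ_cons, List.drop_zero]
        rw [ih rest [] (cur.reverse :: acc) (by simp at h; omega)]
        simp only [splitStar, if_pos hc]
        cases hs : splitStar rest with
        | nil => exact absurd hs (splitStar_ne_nil rest)
        | cons p ps => simp
      · rw [PySem.Chars.splitOn.go]
        have hp : List.isPrefixOf ['*'] (c :: rest) = false := by
          simp [List.isPrefixOf]
          exact fun hh => hc hh.symm
        rw [hp]
        simp only [Bool.false_eq_true, if_false]
        rw [ih rest (c :: cur) acc (by simp at h; omega)]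
        simp only [splitStar, if_neg hc]
        cases hs : splitStar rest with
        | nil => exact absurd hs (splitStar_ne_nil rest)
        | cons p ps => simp

lemma splitOn_eq (cs : List Char) : PySem.Chars.splitOn cs ['*'] = splitStar cs := by
  rw [PySem.Chars.splitOn, go_eq (cs.length + 1) cs [] [] (by omega)]
  cases hs : splitStar cs with
  | nil => exact absurd hs (splitStar_ne_nil cs)
  | cons p ps => simp

lemma starless_splitStar (cs : List Char) : ∀ p ∈ splitStar cs, '*' ∉ p := by
  induction cs with
  | nil => simp [splitStar]
  | cons c t ih =>
    by_cases hc : c = '*'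
    · simp only [splitStar, if_pos hc]
      intro p hp
      rcases List.mem_cons.1 hp with h | h
      · simp [h]
      · exact ih p h
    · simp only [splitStar, if_neg hc]
      cases hs : splitStar t with
      | nil => exact absurd hs (splitStar_ne_nil t)
      | cons q qs =>
        intro p hp
        rcases List.mem_cons.1 hp with h | h
        · subst h
          simp only [List.mem_cons, not_or]
          exact ⟨fun hh => hc hh.symm, ih q (by rw [hs]; exact List.mem_cons_self)⟩
        · exact ih p (by rw [hs]; exact List.mem_cons_of_mem _ h)

lemma join_splitStar (cs : List Char) : PySem.Chars.join ['*'] (splitStar cs) = cs := by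
  induction cs with
  | nil => simp [splitStar, PySem.Chars.join, List.intercalate]
  | cons c t ih =>
    by_cases hc : c = '*'
    · simp only [splitStar, if_pos hc]
      cases hs : splitStar t with
      | nil => exact absurd hs (splitStar_ne_nil t)
      | cons p ps =>
        rw [PySem.Chars.join_cons_cons]
        rw [hs] at ih
        simp [ih, hc]
    · simp only [splitStar, if_neg hc]
      cases hs : splitStar t with
      | nil => exact absurd hs (splitStar_ne_nil t)
      | cons p ps =>
        rw [hs] at ih
        cases ps with
        | nil => simpa [PySem.Chars.join_singleton] using congrArg (c :: ·) ih
        | cons q qs =>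
          rw [PySem.Chars.join_cons_cons] at ih ⊢
          simpa using ih

lemma join_concat (mid : List (List Char)) (pl : List Char) (h : mid ≠ []) :
    PySem.Chars.join ['*'] (mid ++ [pl]) = PySem.Chars.join ['*'] mid ++ '*' :: pl := by
  induction mid with
  | nil => simp at h
  | cons m ms ih =>
    cases ms with
    | nil => simp [PySem.Chars.join_cons_cons, PySem.Chars.join_singleton]
    | cons m2 ms2 =>
      have ih' := ih (by simp)
      simp only [List.cons_append] at ih' ⊢
      rw [PySem.Chars.join_cons_cons, PySem.Chars.join_cons_cons, ih']
      simp

-- index of the first '*' in a char list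
def firstStar : List Char → Option Nat
  | [] => none
  | c :: t => if c = '*' then some 0 else (firstStar t).map (· + 1)

-- index of the last '*' in a char list
def lastStar : List Char → Option Nat
  | [] => none
  | c :: t =>
    match lastStar t with
    | some k => some (k + 1)
    | none => if c = '*' then some 0 else none

lemma firstStar_eq_none (cs : List Char) (h : '*' ∉ cs) : firstStar cs = none := by
  induction cs with
  | nil => rfl
  | cons c t ih =>
    simp only [List.mem_cons, not_or] at h
    have hc : c ≠ '*' := fun hh => h.1 hh.symm
    simp [firstStar, hc, ih h.2]

lemma lastStar_eq_none (cs : List Char) (h : '*' ∉ cs) : lastStar cs = none := by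
  induction cs with
  | nil => rfl
  | cons c t ih =>
    simp only [List.mem_cons, not_or] at h
    have hc : c ≠ '*' := fun hh => h.1 hh.symm
    simp [lastStar, hc, ih h.2]

lemma firstStar_append_star (p r : List Char) (h : '*' ∉ p) :
    firstStar (p ++ '*' :: r) = some p.length := by
  induction p with
  | nil => simp [firstStar]
  | cons c t ih =>
    simp only [List.mem_cons, not_or] at h
    have hc : c ≠ '*' := fun hh => h.1 hh.symm
    simp [firstStar, hc, ih h.2]

lemma lastStar_append (l₁ l₂ : List Char) :
    lastStar (l₁ ++ l₂)
      = match lastStar l₂ with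
        | some m => some (l₁.length + m)
        | none => lastStar l₁ := by
  induction l₁ with
  | nil => cases h : lastStar l₂ <;> simp [h, lastStar]
  | cons c t ih =>
    simp only [List.cons_append, lastStar, ih]
    cases h : lastStar l₂ with
    | none => simp
    | some m =>
      cases h2 : lastStar t <;> simp [Nat.add_assoc, Nat.add_comm]

-- A's loop body on the enumerate view
def pvStep (p : Option Int × Option Int) (jc : Int × Char) : Option Int × Option Int :=
  if jc.2 = '*' then
    match p.1 with
    | none => (some jc.1, p.2)
    | some _ => (p.1, some jc.1)
  else p

lemma lastStar_fold (t : List Char) (s a : Int) (o : Option Int) :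
    (PySem.List.enumerate t s).foldl pvStep (some a, o)
      = (some a, match lastStar t with | some m => some (s + m) | none => o) := by
  induction t generalizing s o with
  | nil => simp [PySem.List.enumerate_nil, lastStar]
  | cons c t ih =>
    rw [PySem.List.enumerate_cons]
    simp only [List.foldl_cons]
    by_cases hc : c = '*'
    · simp only [pvStep, hc]
      rw [if_pos trivial, ih]
      cases h : lastStar t with
      | none => simp [lastStar, h, hc]
      | some k => simp [lastStar, h, hc]; push_cast; ring
    · simp only [pvStep, if_neg hc]
      rw [ih]
      cases h : lastStar t with
      | none => simp [lastStar, h, hc]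
      | some k => simp [lastStar, h, hc]; push_cast; ring

lemma firstStar_fold (t : List Char) (s : Int) :
    (PySem.List.enumerate t s).foldl pvStep (none, none)
      = match firstStar t with
        | none => (none, none)
        | some k => (some (s + k),
            match lastStar (t.drop (k + 1)) with
            | some m => some (s + k + 1 + m)
            | none => none) := by
  induction t generalizing s with
  | nil => simp [PySem.List.enumerate_nil, firstStar]
  | cons c t ih =>
    rw [PySem.List.enumerate_cons]
    simp only [List.foldl_cons]
    by_cases hc : c = '*'
    · simp only [pvStep, hc]
      rw [if_pos trivial, lastStar_fold t (s+1) s none]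
      simp only [firstStar, hc]
      cases h : lastStar t with
      | none => simp [h, List.drop_succ_cons]
      | some m => simp [h, List.drop_succ_cons]
    · simp only [pvStep, if_neg hc]
      rw [ih (s+1)]
      simp only [firstStar, hc]
      cases h : firstStar t with
      | none => simp
      | some k =>
        simp only [Option.map_some]
        cases h2 : lastStar (t.drop (k+1)) with
        | none => simp [List.drop_succ_cons, h2, h]; ring_nf
        | some m => simp [List.drop_succ_cons, h2, h]; ring_nf

lemma foldA_eq (cs : List Char) :
    (PySem.List.pyRange 0 (cs.length : Int) 1).foldl (pvBodyA cs) (none, none)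
      = (PySem.List.enumerate cs 0).foldl pvStep (none, none) := by
  rw [PySem.List.enumerate_eq_map_pyRange (d := ' '), List.foldl_map]
  rfl

-- ===== VERDICT (by name: the statement is the Claim_ definition above) =====
theorem compile_italic_star_spec : Claim_equal_compile_italic_star := by
  intro line _
  unfold Spec_compile_italic_star compile_italic_star compile_italic_star_alt
  have hstar : "*".toList = ['*'] := rfl
  rw [hstar, foldA_eq, firstStar_fold, splitOn_eq]
  cases hp : splitStar line.toList with
  | nil => exact absurd hp (splitStar_ne_nil _)
  | cons p0 rest =>
    have hcs : line.toList = PySem.Chars.join ['*'] (p0 :: rest) := by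
      rw [← hp, join_splitStar]
    have hp0 : '*' ∉ p0 := starless_splitStar line.toList p0 (by rw [hp]; exact List.mem_cons_self)
    cases rest with
    | nil =>
      -- one part: no '*' in the line at all
      rw [PySem.Chars.join_singleton] at hcs
      rw [firstStar_eq_none line.toList (by rw [hcs]; exact hp0)]
      simp
    | cons r1 rest2 =>
      cases rest2 with
      | nil =>
        -- two parts: exactly one '*'
        have hr1 : '*' ∉ r1 := starless_splitStar line.toList r1 (by rw [hp]; simp)
        rw [PySem.Chars.join_cons_cons, PySem.Chars.join_singleton] at hcs
        have hcs' : line.toList = p0 ++ '*' :: r1 := by simpa using hcs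
        rw [hcs', firstStar_append_star p0 r1 hp0]
        dsimp only
        have hdrop : (p0 ++ '*' :: r1).drop (p0.length + 1) = r1 := by
          rw [← List.drop_drop, List.drop_left]
          simp
        rw [hdrop, lastStar_eq_none r1 hr1]
        simp
      | cons r2 rs =>
        -- three or more parts: two '*' exist
        set rest : List (List Char) := r1 :: r2 :: rs with hrestdef
        have hrest_ne : rest ≠ [] := by simp [hrestdef]
        set pl : List Char := rest.getLast hrest_ne with hpl
        set mid : List (List Char) := rest.dropLast with hmid
        have hrest : rest = mid ++ [pl] := (List.dropLast_append_getLast hrest_ne).symm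
        have hmid_ne : mid ≠ [] := by
          have : mid.length = rs.length + 1 := by simp [hmid, hrestdef]
          intro h; rw [h] at this; simp at this
        have hplmem : pl ∈ splitStar line.toList := by
          rw [hp]
          exact List.mem_cons_of_mem _ (List.getLast_mem hrest_ne)
        have hplstar : '*' ∉ pl := starless_splitStar line.toList pl hplmem
        set M : List Char := PySem.Chars.join ['*'] mid with hM
        have hjoin : PySem.Chars.join ['*'] rest = M ++ '*' :: pl := by
          rw [hrest, join_concat mid pl hmid_ne]
        have hcs' : line.toList = p0 ++ '*' :: (M ++ '*' :: pl) := by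
          rw [hcs]
          rw [hrestdef] at hjoin ⊢
          rw [PySem.Chars.join_cons_cons]
          simp [hjoin]
        rw [hcs', firstStar_append_star p0 _ hp0]
        dsimp only
        have hdrop : (p0 ++ '*' :: (M ++ '*' :: pl)).drop (p0.length + 1) = M ++ '*' :: pl := by
          rw [← List.drop_drop, List.drop_left]
          simp
        rw [hdrop, lastStar_append M ('*' :: pl)]
        have hlast : lastStar ('*' :: pl) = some 0 := by
          simp [lastStar, lastStar_eq_none pl hplstar]
        rw [hlast]
        simp only [Nat.add_zero, zero_add]
        -- guard on B's side is false: parts has length ≥ 3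
        rw [if_neg (by simp [hrestdef])]
        -- evaluate B's pieces
        have hBlast : (r1 :: r2 :: rs).getLastD [] = pl := by
          rw [show (r1 :: r2 :: rs) = rest from rfl, hrest]
          simp
        have hBmid : (r1 :: r2 :: rs).dropLast = mid := rfl
        rw [hBlast, hBmid, ← hM]
        -- evaluate A's slices
        have hk1 : (p0.length : Int) + 1 = ((p0.length + 1 : Nat) : Int) := by push_cast; ring
        simp only [PySem.Chars.slice_eq_listSlice]
        rw [PySem.List.slice_to_natCast, hk1, PySem.List.slice_natCast_add]
        have hb1 : ((p0.length + 1 : Nat) : Int) + (M.length : Int) + 1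
            = ((p0.length + 1 + M.length + 1 : Nat) : Int) := by push_cast; ring
        rw [hb1, PySem.List.slice_from_natCast]
        have ht1 : (p0 ++ '*' :: (M ++ '*' :: pl)).take p0.length = p0 := by
          have := List.take_left (l₁ := p0) (l₂ := '*' :: (M ++ '*' :: pl))
          simpa using this
        have ht2 : ((p0 ++ '*' :: (M ++ '*' :: pl)).drop (p0.length + 1)).take M.length = M := by
          rw [hdrop]
          simp
        have ht3 : (p0 ++ '*' :: (M ++ '*' :: pl)).drop (p0.length + 1 + M.length + 1) = pl := by
          have : p0.length + 1 + M.length + 1 = (p0.length + 1) + (M.length + 1) := by ring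
          rw [this, ← List.drop_drop, hdrop]
          rw [show M.length + 1 = M.length + 1 from rfl, ← List.drop_drop, List.drop_left]
          simp
        rw [ht1, ht2, ht3]
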